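-- pv_equiv track=rewrite | github.com/jasonhyang/calculate_utilities | calculate_utilities/calculate_correlation.py | convert_data2RankDict
-- ===== SOURCE A (Python) =====
-- from copy import copy
--
-- def convert_data2RankDict(data_I):
--     '''convert list of numeric data to an integer rank
--     INPUT:
--     data_I = list of numerics
--     OUTPUT
--     rank_O = {} of data[i]:int
--     '''
--     rank_O = [];
--     data = copy(data_I);
--     data.sort(); #lowest to highest
--     #make the data_dict
--     rank_O = {};
--     for i,d in enumerate(data):
--         rank_O[d]=i;
--     return rank_O;
-- ===== SOURCE B (Python) =====
-- def convert_data2RankDict(data_I):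
--     '''convert list of numeric data to an integer rank (counting version)'''
--     counts = {}
--     for x in data_I:
--         counts[x] = counts.get(x, 0) + 1
--     rank_O = {}
--     total = 0
--     for d in sorted(counts):
--         total += counts[d]
--         rank_O[d] = total - 1
--     return rank_O
-- ===== Notes on version B (the rewrite author's own statement) =====
-- stated objective: alternative
-- what changed: A sorts the whole list and enumerates it, letting later duplicate indices overwrite earlier ones; B instead builds a multiplicity counter in one pass and walks only the distinct values in ascending order with a running prefix sum of counts, so each rank is total-so-far minus one and duplicates never produce overwrites.
import Mathlib
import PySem

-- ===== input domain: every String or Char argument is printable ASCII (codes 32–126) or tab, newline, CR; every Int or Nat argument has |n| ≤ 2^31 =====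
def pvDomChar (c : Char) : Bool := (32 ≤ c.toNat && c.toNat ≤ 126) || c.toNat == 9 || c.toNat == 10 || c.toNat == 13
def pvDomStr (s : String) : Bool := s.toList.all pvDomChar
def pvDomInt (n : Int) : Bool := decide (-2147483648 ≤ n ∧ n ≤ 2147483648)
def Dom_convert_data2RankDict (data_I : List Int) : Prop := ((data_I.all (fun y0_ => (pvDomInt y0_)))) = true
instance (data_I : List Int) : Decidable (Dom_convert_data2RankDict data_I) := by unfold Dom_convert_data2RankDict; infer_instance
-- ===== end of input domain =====

-- B replaces A's sort-everything-and-enumerate with a one-pass value counter plus a running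
-- prefix sum over the (often fewer) distinct values; same returned dict (alternative decomposition).

-- ===== PORT A =====
-- A: copy the list, sort it, then rank_O[d] = i for each (i, d) in enumerate(sorted data); last index wins.
def convert_data2RankDict (data_I : List Int) : List (Int × Int) :=
  let data := PySem.List.sorted data_I (fun x => x) false
  ((PySem.List.enumerate data 0).foldl
      (fun d p => d.insert p.2 p.1) (PySem.Dict.empty : PySem.Dict Int Int)).items

-- ===== PORT B =====
-- B: counts[x] = multiplicity of x; then walk the distinct values in ascending order keeping a
-- running total of the counts; rank_O[d] = total - 1.
def convert_data2RankDict_alt (data_I : List Int) : List (Int × Int) :=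
  let counts := data_I.foldl (fun d x => d.insert x (d.getD x 0 + 1))
      (PySem.Dict.empty : PySem.Dict Int Int)
  (((PySem.List.sorted counts.keys (fun x => x) false).foldl
      (fun (p : PySem.Dict Int Int × Int) d =>
        (p.1.insert d (p.2 + counts.getD d 0 - 1), p.2 + counts.getD d 0))
      (PySem.Dict.empty, 0)).1).items

-- ===== PRECONDITION & SPEC =====
def Spec_convert_data2RankDict (data_I : List Int) (out : List (Int × Int)) : Prop := out = convert_data2RankDict_alt data_I
instance (data_I : List Int) (out : List (Int × Int)) : Decidable (Spec_convert_data2RankDict data_I out) := by unfold Spec_convert_data2RankDict; infer_instance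

-- ===== CLAIM (what is proved, stated in full; the proofs are below) =====
def Claim_equal_convert_data2RankDict : Prop := ∀ (data_I : List Int), Dom_convert_data2RankDict data_I → Spec_convert_data2RankDict data_I (convert_data2RankDict data_I)

-- ===== LEMMAS AND PROOFS =====

-- dedup of a list is a sublist of it
lemma pv_ofList_sublist : ∀ (s : List Int), (PySem.Set.ofList s).Sublist s := by
  intro s
  induction s with
  | nil => simp [PySem.Set.ofList_nil]
  | cons x t ih =>
      rw [PySem.Set.ofList_cons]
      exact List.Sublist.cons₂ x ((List.filter_sublist).trans ih)

-- dedup of a ≤-sorted list is <-sorted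
lemma pv_ofList_pairwise_lt (s : List Int) (h : s.Pairwise (· ≤ ·)) :
    (PySem.Set.ofList s).Pairwise (· < ·) := by
  have hle : (PySem.Set.ofList s).Pairwise (· ≤ ·) := h.sublist (pv_ofList_sublist s)
  have hnd : (PySem.Set.ofList s).Nodup := PySem.Set.nodup_ofList s
  exact (hle.and hnd).imp (fun {a b} hab => lt_of_le_of_ne hab.1 hab.2)

-- value stored by A's enumerate loop: the last index of k in the sorted list = (# of ≤ k) - 1
lemma pv_A_getD : ∀ (s : List Int), s.Pairwise (· ≤ ·) → ∀ k, k ∈ s →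
    ((PySem.List.enumerate s 0).foldl (fun d p => d.insert p.2 p.1)
        (PySem.Dict.empty : PySem.Dict Int Int)).getD k 0
      = (s.countP (fun x => decide (x ≤ k)) : Int) - 1 := by
  intro s
  induction s using List.reverseRecOn with
  | nil => intro _ k hk; simp at hk
  | append_singleton t x ih =>
      intro hp k hk
      have hpt : t.Pairwise (· ≤ ·) := hp.sublist (by simp)
      have hall : ∀ y ∈ t, y ≤ x := by
        intro y hy
        exact (List.pairwise_append.mp hp).2.2 y hy x (by simp)
      rw [PySem.List.enumerate_append, List.foldl_append]
      simp only [PySem.List.enumerate_cons, PySem.List.enumerate_nil, List.foldl_cons, List.foldl_nil]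
      by_cases hkx : k = x
      · subst hkx
        rw [PySem.Dict.getD_insert_self]
        have hcount : t.countP (fun x_1 => decide (x_1 ≤ k)) = t.length :=
          List.countP_eq_length.mpr (fun y hy => by simpa using hall y hy)
        simp [List.countP_append, hcount]
      · rw [PySem.Dict.getD_insert_of_ne _ _ _ hkx]
        have hkt : k ∈ t := by
          rcases List.mem_append.mp hk with h | h
          · exact h
          · simp at h; exact absurd h hkx
        have hxk : ¬ (x ≤ k) := by
          have : k ≤ x := hall k hkt
          rcases lt_or_eq_of_le this with h | h
          · omega
          · exact absurd h hkx
        rw [ih hpt k hkt]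
        simp [List.countP_append, hxk]

-- characterisation of A: items = ascending distinct values, paired with (# of ≤ k) - 1
lemma pv_A_items (xs : List Int) :
    convert_data2RankDict xs
      = (PySem.Set.ofList (PySem.List.sorted xs (fun x => x) false)).map
          (fun k => (k, (xs.countP (fun x => decide (x ≤ k)) : Int) - 1)) := by
  unfold convert_data2RankDict
  set s := PySem.List.sorted xs (fun x => x) false with hs
  have hkeys : ((PySem.List.enumerate s 0).foldl (fun d p => d.insert p.2 p.1)
      (PySem.Dict.empty : PySem.Dict Int Int)).keys = PySem.Set.ofList s := by
    have := PySem.Dict.keys_foldl_insert_key (PySem.List.enumerate s 0)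
        (fun p => p.2) (fun _ p => p.1) (PySem.Dict.empty : PySem.Dict Int Int)
    simpa [PySem.List.map_snd_enumerate, PySem.Set.update_nil_left, PySem.Dict.keys_empty] using this
  have hnd : ((PySem.List.enumerate s 0).foldl (fun d p => d.insert p.2 p.1)
      (PySem.Dict.empty : PySem.Dict Int Int)).keys.Nodup := by
    rw [hkeys]; exact PySem.Set.nodup_ofList s
  rw [PySem.Dict.items_eq_map_keys _ hnd 0, hkeys]
  apply List.map_congr_left
  intro k hk
  have hks : k ∈ s := (PySem.Set.mem_ofList s k).mp hk
  have hsp : s.Pairwise (· ≤ ·) := PySem.List.sorted_pairwise xs (fun x => x)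
  rw [pv_A_getD s hsp k hks]
  have : s.countP (fun x => decide (x ≤ k)) = xs.countP (fun x => decide (x ≤ k)) :=
    (PySem.List.sorted_perm xs (fun x => x) false).countP_eq _
  rw [this]

-- spec of B's running-total loop: the value at k is T plus the prefix sum of f up to and including k
def pvBspec (f : Int → Int) : Int → List Int → List (Int × Int)
  | _, [] => []
  | T, k :: t => (k, T + f k - 1) :: pvBspec f (T + f k) t

lemma pv_B_fold (f : Int → Int) : ∀ (ks : List Int) (D : PySem.Dict Int Int) (T : Int),
    ks.Nodup → (∀ k ∈ ks, D.contains k = false) →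
    ((ks.foldl (fun (p : PySem.Dict Int Int × Int) d => (p.1.insert d (p.2 + f d - 1), p.2 + f d))
        (D, T)).1).items
      = D.items ++ pvBspec f T ks := by
  intro ks
  induction ks with
  | nil => intro D T _ _; simp [pvBspec]
  | cons k t ih =>
      intro D T hnd hfresh
      rw [List.foldl_cons]
      have hfk : D.contains k = false := hfresh k (by simp)
      have hfresh' : ∀ k' ∈ t, (D.insert k (T + f k - 1)).contains k' = false := by
        intro k' hk'
        rw [PySem.Dict.contains_insert]
        have hne : k' ≠ k := by
          rintro rfl; exact (List.nodup_cons.mp hnd).1 hk'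
        simp [hne, hfresh k' (by simp [hk'])]
      rw [ih _ _ (List.nodup_cons.mp hnd).2 hfresh',
          PySem.Dict.items_insert_of_not_contains _ _ hfk]
      simp [pvBspec]

-- the prefix sums of the counts along the full ascending distinct list are ≤-counts
lemma pv_countP_le_split (k : Int) : ∀ (xs : List Int),
    xs.countP (fun x => decide (x ≤ k)) = xs.countP (fun x => decide (x < k)) + List.count k xs := by
  intro xs
  induction xs with
  | nil => simp
  | cons y t ih =>
      simp only [List.countP_cons, List.count_cons, ih]
      by_cases h2 : y = k
      · subst h2
        simp
        omega
      · by_cases h1 : y ≤ k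
        · have : y < k := lt_of_le_of_ne h1 h2
          simp [h1, this, h2]
          omega
        · have : ¬ y < k := fun h => h1 (le_of_lt h)
          simp [h1, this, h2]

lemma pv_bspec_eq (xs : List Int) : ∀ (ks : List Int) (T : Int), ks.Pairwise (· < ·) →
    (∀ x ∈ xs, ∀ k ∈ ks, x ≤ k → x ∈ ks ∨ (∀ k0 t0, ks = k0 :: t0 → x < k0)) →
    (∀ k0 t0, ks = k0 :: t0 → T = (xs.countP (fun x => decide (x < k0)) : Int)) →
    pvBspec (fun d => (List.count d xs : Int)) T ks
      = ks.map (fun k => (k, (xs.countP (fun x => decide (x ≤ k)) : Int) - 1)) := by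
  intro ks
  induction ks with
  | nil => intro T _ _ _; simp [pvBspec]
  | cons k t ih =>
      intro T hp hcover hT
      have hT0 : T = (xs.countP (fun x => decide (x < k)) : Int) := hT k t rfl
      have hhead : T + (List.count k xs : Int) = (xs.countP (fun x => decide (x ≤ k)) : Int) := by
        rw [hT0, pv_countP_le_split k xs]; push_cast; ring
      have hklt : ∀ k' ∈ t, k < k' := fun k' hk' => (List.pairwise_cons.mp hp).1 k' hk'
      have hpt : t.Pairwise (· < ·) := (List.pairwise_cons.mp hp).2
      have hcover' : ∀ x ∈ xs, ∀ k' ∈ t, x ≤ k' → x ∈ t ∨ (∀ k0 t0, t = k0 :: t0 → x < k0) := by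
        intro x hx k' hk' hxk'
        rcases hcover x hx k' (by simp [hk']) hxk' with hmem | hlt
        · rcases List.mem_cons.mp hmem with hmem | hmem
          · -- x = k, the dropped head: x is below every element of t
            right; intro k0 t0 ht0
            have : k < k0 := hklt k0 (by rw [ht0]; simp)
            omega
          · left; exact hmem
        · -- x < k: below everything in t too
          right; intro k0 t0 ht0
          have h1 : x < k := hlt k t rfl
          have h2 : k < k0 := hklt k0 (by rw [ht0]; simp)
          omega
      have hT' : ∀ k0 t0, t = k0 :: t0 →
          T + (List.count k xs : Int) = (xs.countP (fun x => decide (x < k0)) : Int) := by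
        intro k0 t0 ht0
        rw [hhead]
        congr 1
        apply List.countP_congr
        intro x hx
        simp only [decide_eq_true_eq]
        constructor
        · intro hxk
          have : k < k0 := hklt k0 (by rw [ht0]; simp)
          omega
        · intro hxk0
          have hle : x ≤ k0 := le_of_lt hxk0
          rcases hcover x hx k0 (by rw [ht0]; simp) hle with hmem | hlt
          · rcases List.mem_cons.mp hmem with hmem | hmem
            · omega
            · -- x ∈ t, but x < k0 = head of t and t is <-sorted: impossible
              rw [ht0] at hmem
              rcases List.mem_cons.mp hmem with hmem | hmem
              · omega
              · have : k0 < x := by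
                  have := (List.pairwise_cons.mp (ht0 ▸ hpt)).1 x hmem
                  exact this
                omega
          · have : x < k := hlt k t rfl
            omega
      rw [List.map_cons]
      show (k, T + (List.count k xs : Int) - 1) :: _ = _
      rw [hhead] at hT' ⊢
      rw [ih _ hpt hcover' hT']

-- characterisation of B: the same map over sorted distinct values
lemma pv_B_items (xs : List Int) :
    convert_data2RankDict_alt xs
      = (PySem.List.sorted (PySem.Set.ofList xs) (fun x => x) false).map
          (fun k => (k, (xs.countP (fun x => decide (x ≤ k)) : Int) - 1)) := by
  unfold convert_data2RankDict_alt
  simp only [PySem.Dict.foldl_insert_getD_add_one_eq_counter, PySem.Dict.keys_counter,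
    PySem.Dict.getD_counter]
  set ks := PySem.List.sorted (PySem.Set.ofList xs) (fun x => x) false with hks
  have hperm : ks.Perm (PySem.Set.ofList xs) := PySem.List.sorted_perm _ _ _
  have hnd : ks.Nodup := hperm.nodup_iff.mpr (PySem.Set.nodup_ofList xs)
  have hmemks : ∀ x ∈ xs, x ∈ ks := by
    intro x hx
    exact hperm.mem_iff.mpr ((PySem.Set.mem_ofList xs x).mpr hx)
  rw [pv_B_fold (fun d => (List.count d xs : Int)) ks PySem.Dict.empty 0 hnd
        (fun k _ => PySem.Dict.contains_empty k)]
  have hemp : (PySem.Dict.empty : PySem.Dict Int Int).items = [] := rfl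
  rw [hemp, List.nil_append]
  have h1 : ks.Pairwise (· < ·) := PySem.List.sorted_ofList_pairwise_lt xs
  have h2 : ∀ x ∈ xs, ∀ k ∈ ks, x ≤ k → x ∈ ks ∨ (∀ k0 t0, ks = k0 :: t0 → x < k0) := by
    intro x hx k _ _; left; exact hmemks x hx
  have h3 : ∀ k0 t0, ks = k0 :: t0 → (0 : Int) = (xs.countP (fun x => decide (x < k0)) : Int) := by
    intro k0 t0 ht0
    have hmin : ∀ y ∈ PySem.Set.ofList xs, k0 ≤ y :=
      PySem.List.key_head_sorted_le (PySem.Set.ofList xs) (fun x => x) ht0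
    have hz : xs.countP (fun x => decide (x < k0)) = 0 := by
      rw [List.countP_eq_zero]
      intro a ha
      have := hmin a ((PySem.Set.mem_ofList xs a).mpr ha)
      simp; omega
    rw [hz]; rfl
  exact pv_bspec_eq xs ks 0 h1 h2 h3

-- ===== VERDICT (by name: the statement is the Claim_ definition above) =====
theorem convert_data2RankDict_spec : Claim_equal_convert_data2RankDict := by
  intro xs _
  show convert_data2RankDict xs = convert_data2RankDict_alt xs
  rw [pv_A_items, pv_B_items]
  congr 1
  symm
  apply PySem.List.sorted_eq_of_perm_of_pairwise_lt
  · -- ofList (sorted xs) ~ ofList xs : both nodup with the same members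
    rw [List.perm_ext_iff_of_nodup (PySem.Set.nodup_ofList _) (PySem.Set.nodup_ofList _)]
    intro a
    rw [PySem.Set.mem_ofList, PySem.Set.mem_ofList, PySem.List.mem_sorted]
  · exact pv_ofList_pairwise_lt _ (PySem.List.sorted_pairwise xs (fun x => x))
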